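-- pv_equiv track=rewrite | github.com/thamin-i/advent-of-code-2025 | advent_of_code_2025/day_04/common.py | rec_compute_accessible_rolls
-- ===== SOURCE A (Python) =====
-- import itertools
-- import typing as t
--
-- def is_roll_accessible(grid: t.List[t.List[str]], row: int, col: int) -> bool:
--     """Check if a roll at a given position is accessible.
--     An accessible roll is defined as one that has less than 4 adjacent rolls.
--
--     Args:
--         grid (t.List[t.List[str]]): The grid representing the rolls.
--         row (int): The row index of the roll.
--         col (int): The column index of the roll.
--
--     Returns:
--         bool: True if the roll is accessible, False otherwise.
--     """
--     adjacent_rolls: int = 0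
--     directions: t.List[t.Tuple[int, int]] = [
--         t.cast(t.Tuple[int, int], direction)
--         for direction in itertools.product([-1, 0, 1], repeat=2)
--         if direction != (0, 0)
--     ]
--
--     for row_direction, col_direction in directions:
--         r, c = row + row_direction, col + col_direction
--         if 0 <= r < len(grid) and 0 <= c < len(grid[0]):
--             if grid[r][c] == "@":
--                 adjacent_rolls += 1
--
--     if adjacent_rolls >= 4:
--         return False
--
--     return True
--
-- def rec_compute_accessible_rolls(
--     grid: t.List[t.List[str]], accessible_rolls: int = 0, part_01: bool = False
-- ) -> int:
--     """Recursively compute the number of accessible rolls in the grid.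
--
--     Args:
--         grid (t.List[t.List[str]]):
--             The grid representing the rolls.
--         accessible_rolls (int, optional):
--             The current count of accessible rolls. Defaults to 0.
--         part_01 (bool, optional):
--             If True, disables recursion. Defaults to False.
--
--     Returns:
--         int: The number of accessible rolls in the grid.
--     """
--     accessed_new_rolls: bool = False
--
--     for i, row in enumerate(grid):
--         for j, cell in enumerate(row):
--             if cell == "@" and is_roll_accessible(grid, i, j):
--                 accessible_rolls += 1
--                 # In part two, we mark the roll as accessed
--                 if not part_01:
--                     grid[i][j] = "X"
--                 accessed_new_rolls = True
--
--     # In part one, we do not recurse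
--     if part_01:
--         return accessible_rolls
--
--     if accessed_new_rolls:
--         return rec_compute_accessible_rolls(grid, accessible_rolls)
--
--     return accessible_rolls
-- ===== SOURCE B (Python) =====
-- import typing as t
--
-- _OFFSETS: t.List[t.Tuple[int, int]] = [
--     (-1, -1), (-1, 0), (-1, 1), (0, -1), (0, 1), (1, -1), (1, 0), (1, 1)
-- ]
--
--
-- def _neighbour_counts(width: int, cells: t.Set[t.Tuple[int, int]]) -> t.Dict[t.Tuple[int, int], int]:
--     """For every position, how many live cells (within the column bound) touch it."""
--     counts: t.Dict[t.Tuple[int, int], int] = {}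
--     for (r, c) in cells:
--         if c < width:
--             for dr, dc in _OFFSETS:
--                 key = (r + dr, c + dc)
--                 counts[key] = counts.get(key, 0) + 1
--     return counts
--
--
-- def rec_compute_accessible_rolls(
--     grid: t.List[t.List[str]], accessible_rolls: int = 0, part_01: bool = False
-- ) -> int:
--     width = len(grid[0]) if grid else 0
--     live = {
--         (i, j)
--         for i, row in enumerate(grid)
--         for j, cell in enumerate(row)
--         if cell == "@"
--     }
--     if part_01:
--         counts = _neighbour_counts(width, live)
--         return accessible_rolls + sum(1 for cell in live if counts.get(cell, 0) < 4)
--     removed = 0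
--     while True:
--         counts = _neighbour_counts(width, live)
--         removable = {cell for cell in live if counts.get(cell, 0) < 4}
--         if not removable:
--             return accessible_rolls + removed
--         removed += len(removable)
--         live -= removable
-- ===== Notes on version B (the rewrite author's own statement) =====
-- stated objective: alternative
-- what changed: A recursively rescans the whole mutable grid, marking accessible rolls 'X' one cell at a time until a full pass finds none; B extracts the set of '@' coordinates once, then peels it in rounds, each round building one neighbour-count dictionary and removing all cells with fewer than 4 live neighbours simultaneously (proved equal via order-independence of the peeling process).
import Mathlib
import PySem

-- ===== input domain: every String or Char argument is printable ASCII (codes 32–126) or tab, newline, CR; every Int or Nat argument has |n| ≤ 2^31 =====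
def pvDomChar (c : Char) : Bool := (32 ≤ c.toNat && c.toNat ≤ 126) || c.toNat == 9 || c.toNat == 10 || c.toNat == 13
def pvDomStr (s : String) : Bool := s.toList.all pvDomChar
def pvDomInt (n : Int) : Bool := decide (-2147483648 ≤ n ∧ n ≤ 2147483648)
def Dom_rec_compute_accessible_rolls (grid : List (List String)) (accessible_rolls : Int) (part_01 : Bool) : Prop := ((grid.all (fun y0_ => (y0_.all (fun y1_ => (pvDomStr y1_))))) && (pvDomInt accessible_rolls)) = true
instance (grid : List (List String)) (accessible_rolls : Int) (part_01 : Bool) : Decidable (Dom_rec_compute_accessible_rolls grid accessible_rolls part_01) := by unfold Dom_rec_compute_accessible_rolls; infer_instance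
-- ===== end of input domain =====

-- B replaces A's repeated full-grid rescans (recursion + in-place "X"-marking) by round-based
-- peeling of a coordinate set with a neighbour-count dictionary built once per round ("alternative").
-- A mutates its grid argument in place (marks rolls "X" when part_01 is false); B does not — the
-- equivalence proved here is about the RETURN value only.

-- ===== PORT A =====

-- the constant list the itertools.product comprehension in is_roll_accessible evaluates to
def pvDirections : List (Int × Int) :=
  [(-1,-1),(-1,0),(-1,1),(0,-1),(0,1),(1,-1),(1,0),(1,1)]

def is_roll_accessible (grid : List (List String)) (row col : Int) : Bool :=
  let adjacent_rolls : Int :=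
    pvDirections.foldl (fun adj d =>
      let r := row + d.1
      let c := col + d.2
      -- len(grid[0]): grid is nonempty at every call site ('@' cell exists), so .getD [] is exact
      if 0 ≤ r ∧ r < PySem.List.len grid ∧ 0 ≤ c ∧ c < PySem.List.len ((PySem.List.pyGet? grid 0).getD []) then
        -- grid[r][c]: Pre_ guarantees c < len(grid[r]), so the "" default is never the read value
        (if PySem.List.pyGetD ((PySem.List.pyGet? grid r).getD []) c "" == "@" then adj + 1 else adj)
      else adj) 0
  if adjacent_rolls ≥ 4 then false else true

-- the (i, j) index pairs the two nested for-loops visit (row lengths never change during a pass)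
def pvCells (grid : List (List String)) : List (Int × Int) :=
  (PySem.List.enumerate grid 0).flatMap (fun ir =>
    (PySem.List.enumerate ir.2 0).map (fun jc => (ir.1, jc.1)))

-- one iteration of the nested loop body; state = (grid, accessible_rolls, accessed_new_rolls);
-- the cell is re-read from the current grid: Python iterates the very row objects it mutates
def pvPassStep (part_01 : Bool) (st : List (List String) × Int × Bool) (ij : Int × Int) :
    List (List String) × Int × Bool :=
  let cell := PySem.List.pyGetD (PySem.List.pyGetD st.1 ij.1 []) ij.2 ""
  if cell == "@" && is_roll_accessible st.1 ij.1 ij.2 then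
    ((if part_01 then st.1
      else PySem.List.pySetD st.1 ij.1
             (PySem.List.pySetD (PySem.List.pyGetD st.1 ij.1 []) ij.2 "X")),
     st.2.1 + 1, true)
  else st

def pvAtCount (grid : List (List String)) : Nat := (grid.map (fun row => row.count "@")).sum

-- the recursion of A, guarded by fuel; the `@` count strictly decreases at every recursive
-- call (pvPass_decreases), so fuel `pvAtCount grid + 1` is enough, the 0-case is never reached
def pvRecGo : Nat → List (List String) → Int → Bool → Int
  | 0, _, accessible_rolls, _ => accessible_rolls
  | fuel + 1, grid, accessible_rolls, part_01 =>
    let st := (pvCells grid).foldl (pvPassStep part_01) (grid, accessible_rolls, false)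
    if part_01 then st.2.1
    else if st.2.2 then pvRecGo fuel st.1 st.2.1 false
    else st.2.1

def rec_compute_accessible_rolls (grid : List (List String)) (accessible_rolls : Int) (part_01 : Bool) : Int :=
  pvRecGo (pvAtCount grid + 1) grid accessible_rolls part_01

-- ===== PORT B =====

-- _neighbour_counts: counts[key] = counts.get(key, 0) + 1 over the 8 neighbours of every live cell
def pvNeighbourCounts (width : Int) (cells : List (Int × Int)) : PySem.Dict (Int × Int) Int :=
  cells.foldl (fun counts rc =>
    if rc.2 < width then
      pvDirections.foldl (fun cts d =>
        cts.insert (rc.1 + d.1, rc.2 + d.2) (cts.getD (rc.1 + d.1, rc.2 + d.2) 0 + 1)) counts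
    else counts) PySem.Dict.empty

-- the set comprehension building `live`
def pvLive (grid : List (List String)) : PySem.Set (Int × Int) :=
  PySem.Set.ofList ((PySem.List.enumerate grid 0).flatMap (fun ir =>
    (PySem.List.enumerate ir.2 0).filterMap (fun jc =>
      if jc.2 == "@" then some (ir.1, jc.1) else none)))

-- the `while True` loop of part two, guarded by fuel; every iteration removes at least one
-- live cell, so fuel `live.length + 1` is enough and the 0-case is never reached (pvPeel_spec)
def pvPeel (width : Int) : Nat → Int → PySem.Set (Int × Int) → Int
  | 0, removed, _ => removed
  | fuel + 1, removed, live =>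
    let counts := pvNeighbourCounts width live
    let removable : PySem.Set (Int × Int) :=
      PySem.Set.ofList (live.filter (fun cell => decide (counts.getD cell 0 < 4)))
    if removable.isEmpty then removed
    else pvPeel width fuel (removed + PySem.Set.len removable) (PySem.Set.diff live removable)

def rec_compute_accessible_rolls_alt (grid : List (List String)) (accessible_rolls : Int) (part_01 : Bool) : Int :=
  let width : Int := PySem.List.len ((PySem.List.pyGet? grid 0).getD [])  -- len(grid[0]) if grid else 0
  let live := pvLive grid
  if part_01 then
    let counts := pvNeighbourCounts width live
    accessible_rolls + ((live.filter (fun cell => decide (counts.getD cell 0 < 4))).length : Int)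
  else
    accessible_rolls + pvPeel width (live.length + 1) 0 live

-- ===== PRECONDITION & SPEC =====

-- Pre_ excludes exactly the inputs on which A raises IndexError: some '@' cell has an in-bounds
-- neighbour column (col < len(grid[0])) falling beyond the end of a shorter ragged row.
def Pre_rec_compute_accessible_rolls (grid : List (List String)) (accessible_rolls : Int) (part_01 : Bool) : Prop :=
  ∀ i ∈ List.range grid.length, ∀ j ∈ List.range (grid.getD i []).length,
    (grid.getD i []).getD j "" = "@" →
      ∀ d ∈ [((-1 : Int),(-1 : Int)),(-1,0),(-1,1),(0,-1),(0,1),(1,-1),(1,0),(1,1)],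
        0 ≤ (i : Int) + d.1 → (i : Int) + d.1 < (grid.length : Int) →
        0 ≤ (j : Int) + d.2 → (j : Int) + d.2 < ((grid.headD []).length : Int) →
        (j : Int) + d.2 < ((grid.getD ((i : Int) + d.1).toNat []).length : Int)
instance (grid : List (List String)) (accessible_rolls : Int) (part_01 : Bool) : Decidable (Pre_rec_compute_accessible_rolls grid accessible_rolls part_01) := by unfold Pre_rec_compute_accessible_rolls; infer_instance

def pvWitness_rec_compute_accessible_rolls : List (List String) × Int × Bool := ([["@", "@"], ["@", "."]], 0, false)

def Spec_rec_compute_accessible_rolls (grid : List (List String)) (accessible_rolls : Int) (part_01 : Bool) (out : Int) : Prop := out = rec_compute_accessible_rolls_alt grid accessible_rolls part_01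
instance (grid : List (List String)) (accessible_rolls : Int) (part_01 : Bool) (out : Int) : Decidable (Spec_rec_compute_accessible_rolls grid accessible_rolls part_01 out) := by unfold Spec_rec_compute_accessible_rolls; infer_instance

-- ===== CLAIM (what is proved, stated in full; the proofs are below) =====
def Claim_equal_rec_compute_accessible_rolls : Prop := ∀ (grid : List (List String)) (accessible_rolls : Int) (part_01 : Bool), Dom_rec_compute_accessible_rolls grid accessible_rolls part_01 → Pre_rec_compute_accessible_rolls grid accessible_rolls part_01 → Spec_rec_compute_accessible_rolls grid accessible_rolls part_01 (rec_compute_accessible_rolls grid accessible_rolls part_01)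


-- ===== LEMMAS AND PROOFS =====

-- ---- proof-side vocabulary ----

def pvH (g : List (List String)) : Int := (g.length : Int)
def pvW (g : List (List String)) : Int := (((PySem.List.pyGet? g 0).getD [] : List String).length : Int)
def pvInB (H W : Int) (y : Int × Int) : Bool :=
  decide (0 ≤ y.1) && decide (y.1 < H) && decide (0 ≤ y.2) && decide (y.2 < W)
def pvAdj (H W : Int) (x y : Int × Int) : Bool :=
  decide ((y.1 - x.1, y.2 - x.2) ∈ pvDirections) && pvInB H W y
def pvDeg (H W : Int) (S : Finset (Int × Int)) (x : Int × Int) : Nat :=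
  (S.filter (fun y => pvAdj H W x y = true)).card
def pvStepR (H W : Int) (S S' : Finset (Int × Int)) : Prop :=
  ∃ x ∈ S, pvDeg H W S x < 4 ∧ S' = S.erase x
def pvReach (H W : Int) : Finset (Int × Int) → Finset (Int × Int) → Prop :=
  Relation.ReflTransGen (pvStepR H W)
def pvClosed (H W : Int) (S : Finset (Int × Int)) : Prop := ∀ x ∈ S, 4 ≤ pvDeg H W S x
def pvLiveF (g : List (List String)) : Finset (Int × Int) := (pvLive g).toFinset
def pvShape (g : List (List String)) : List Nat := g.map List.length

-- ---- the abstract peeling system: order of removals does not matter ----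

theorem pvDeg_mono (H W : Int) {T S : Finset (Int × Int)} (h : T ⊆ S) (x : Int × Int) :
    pvDeg H W T x ≤ pvDeg H W S x :=
  Finset.card_le_card (Finset.filter_subset_filter _ h)

theorem pvReach_subset (H W : Int) {S S' : Finset (Int × Int)} (h : pvReach H W S S') : S' ⊆ S := by
  induction h with
  | refl => exact Finset.Subset.refl _
  | tail _ hstep ih =>
    obtain ⟨x, _, _, rfl⟩ := hstep
    exact (Finset.erase_subset _ _).trans ih

theorem pvCore_le (H W : Int) {S S' T : Finset (Int × Int)} (h : pvReach H W S S')
    (hTS : T ⊆ S) (hT : pvClosed H W T) : T ⊆ S' := by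
  induction h with
  | refl => exact hTS
  | tail _ hstep ih =>
    obtain ⟨x, _, hdeg, rfl⟩ := hstep
    refine (Finset.subset_erase).2 ⟨ih, fun hxT => ?_⟩
    exact absurd (lt_of_le_of_lt (le_trans (hT x hxT) (pvDeg_mono H W ih x)) hdeg)
      (lt_irrefl _)

theorem pvFinal_unique (H W : Int) {S A B : Finset (Int × Int)}
    (hA : pvReach H W S A) (hAc : pvClosed H W A)
    (hB : pvReach H W S B) (hBc : pvClosed H W B) : A = B := by
  exact Finset.Subset.antisymm
    (pvCore_le H W hB (pvReach_subset H W hA) hAc)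
    (pvCore_le H W hA (pvReach_subset H W hB) hBc)

theorem pvSeq_remove (H W : Int) (R S : Finset (Int × Int)) (hRS : R ⊆ S)
    (hdeg : ∀ x ∈ R, pvDeg H W S x < 4) : pvReach H W S (S \ R) := by
  classical
  induction hn : R.card using Nat.strong_induction_on generalizing R S with
  | _ n ih =>
    rcases Finset.eq_empty_or_nonempty R with rfl | ⟨x, hxR⟩
    · simpa using Relation.ReflTransGen.refl
    · have hxS : x ∈ S := hRS hxR
      have hstep : pvStepR H W S (S.erase x) := ⟨x, hxS, hdeg x hxR, rfl⟩
      have hsub : R.erase x ⊆ S.erase x := Finset.erase_subset_erase _ hRS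
      have hdeg' : ∀ y ∈ R.erase x, pvDeg H W (S.erase x) y < 4 := fun y hy =>
        lt_of_le_of_lt (pvDeg_mono H W (Finset.erase_subset _ _) y)
          (hdeg y (Finset.mem_of_mem_erase hy))
      have hcard : (R.erase x).card < n := by
        subst hn; exact Finset.card_erase_lt_of_mem hxR
      have hreach := ih _ hcard _ _ hsub hdeg' rfl
      have heq : S.erase x \ R.erase x = S \ R := by
        ext y
        simp only [Finset.mem_sdiff, Finset.mem_erase]
        constructor
        · rintro ⟨⟨hyx, hyS⟩, hyR⟩
          exact ⟨hyS, fun hy => hyR ⟨hyx, hy⟩⟩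
        · rintro ⟨hyS, hyR⟩
          have hyx : y ≠ x := fun h => hyR (h ▸ hxR)
          exact ⟨⟨hyx, hyS⟩, fun hy => hyR hy.2⟩
      rw [heq] at hreach
      exact Relation.ReflTransGen.head hstep hreach

-- ---- A-side bookkeeping ----

theorem mem_pvCells (g : List (List String)) (ij : Int × Int) :
    ij ∈ pvCells g ↔ ∃ i j : Nat, ij = ((i : Int), (j : Int)) ∧ i < g.length ∧ j < (g.getD i []).length := by
  simp only [pvCells, List.mem_flatMap, List.mem_map, PySem.List.mem_enumerate_iff]
  constructor
  · rintro ⟨ir, ⟨i, hi, rfl⟩, jc, ⟨j, hj, rfl⟩, rfl⟩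
    exact ⟨i, j, by simp, hi, by rwa [List.getD_eq_getElem _ _ hi]⟩
  · rintro ⟨i, j, rfl, hi, hj⟩
    rw [List.getD_eq_getElem _ _ hi] at hj
    exact ⟨((i : Int), g[i]), ⟨i, hi, by simp⟩, ((j : Int), g[i][j]), ⟨j, hj, by simp⟩, rfl⟩

theorem pvCells_nonneg (g : List (List String)) : ∀ ij ∈ pvCells g, 0 ≤ ij.1 ∧ 0 ≤ ij.2 := by
  intro ij hij
  obtain ⟨i, j, rfl, _, _⟩ := (mem_pvCells g ij).1 hij
  exact ⟨Int.natCast_nonneg i, Int.natCast_nonneg j⟩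

theorem pvCells_nodup (g : List (List String)) : (pvCells g).Nodup := by
  rw [pvCells, List.nodup_flatMap]
  constructor
  · intro ir _
    have : ((PySem.List.enumerate ir.2 0).map (fun jc => (ir.1, jc.1))) =
        ((PySem.List.enumerate ir.2 0).map (fun jc => jc.1)).map (fun j => (ir.1, j)) := by
      simp [List.map_map, Function.comp]
    rw [this]
    refine List.Nodup.map (fun x y hxy => ?_) ?_
    · exact congrArg Prod.snd hxy
    · rw [PySem.List.map_fst_enumerate]
      exact PySem.List.nodup_pyRange_one _ _
  · refine List.Pairwise.imp ?_ (PySem.List.pairwise_lt_enumerate g 0)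
    intro a b hab
    intro x hxa hxb
    simp only [List.mem_map] at hxa hxb
    obtain ⟨ja, _, rfl⟩ := hxa
    obtain ⟨jb, _, heq⟩ := hxb
    have := congrArg Prod.fst heq
    simp only at this
    omega

theorem pvOfList_eq_append {α : Type} [BEq α] [LawfulBEq α] (l s : List α) (h : (s ++ l).Nodup) :
    List.foldl PySem.Set.add s l = s ++ l := by
  induction l generalizing s with
  | nil => simp
  | cons x l ih =>
    have hx : x ∉ s := by
      intro hmem
      have := List.disjoint_of_nodup_append h
      exact this hmem List.mem_cons_self
    have hadd : PySem.Set.add s x = s ++ [x] := by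
      simp only [PySem.Set.add, List.contains_eq_mem, decide_eq_true_eq]
      simp [hx]
    have h' : ((s ++ [x]) ++ l).Nodup := by
      rwa [← List.append_cons]
    calc List.foldl PySem.Set.add s (x :: l)
        = List.foldl PySem.Set.add (s ++ [x]) l := by rw [List.foldl_cons, hadd]
      _ = (s ++ [x]) ++ l := ih _ h'
      _ = s ++ x :: l := by rw [← List.append_cons]

theorem pvOfList_eq_self {α : Type} [BEq α] [LawfulBEq α] (l : List α) (h : l.Nodup) :
    PySem.Set.ofList l = l := by
  simpa using pvOfList_eq_append l [] (by simpa using h)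

theorem pvFilterMap_ite {α β : Type} (l : List α) (f : α → β) (q : α → Bool) :
    l.filterMap (fun x => if q x then some (f x) else none) = (l.filter q).map f := by
  induction l with
  | nil => simp
  | cons x l ih => simp only [List.filterMap_cons, List.filter_cons]; split <;> simp_all

theorem pvRaw_eq_filter (g : List (List String)) :
    ((PySem.List.enumerate g 0).flatMap (fun ir =>
      (PySem.List.enumerate ir.2 0).filterMap (fun jc =>
        if jc.2 == "@" then some (ir.1, jc.1) else none))) = (pvCells g).filter
      (fun ij => PySem.List.pyGetD (PySem.List.pyGetD g ij.1 []) ij.2 "" == "@") := by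
  rw [pvCells, List.filter_flatMap]
  refine List.flatMap_congr ?_
  intro ir hir
  obtain ⟨i, hi, rfl⟩ := (PySem.List.mem_enumerate_iff _ _ _).1 hir
  rw [List.filter_map, pvFilterMap_ite]
  congr 1
  refine List.filter_congr ?_
  intro jc hjc
  obtain ⟨j, hj, rfl⟩ := (PySem.List.mem_enumerate_iff _ _ _).1 hjc
  simp only [Function.comp, PySem.List.pyGetD_natCast, zero_add]
  rw [List.getD_eq_getElem _ _ hi, List.getD_eq_getElem _ _ hj]

theorem pvLive_eq_filter (g : List (List String)) :
    pvLive g = (pvCells g).filter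
      (fun ij => PySem.List.pyGetD (PySem.List.pyGetD g ij.1 []) ij.2 "" == "@") := by
  rw [pvLive, pvRaw_eq_filter]
  exact pvOfList_eq_self _ ((pvCells_nodup g).filter _)

theorem pvLive_nodup (g : List (List String)) : (pvLive g).Nodup := by
  rw [pvLive_eq_filter]
  exact (pvCells_nodup g).filter _

theorem mem_pvLive (g : List (List String)) (x : Int × Int) :
    x ∈ pvLive g ↔ ∃ i j : Nat, x = ((i : Int), (j : Int)) ∧ i < g.length ∧
      j < (g.getD i []).length ∧ (g.getD i []).getD j "" = "@" := by
  rw [pvLive_eq_filter, List.mem_filter]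
  constructor
  · rintro ⟨hmem, hp⟩
    obtain ⟨i, j, rfl, hi, hj⟩ := (mem_pvCells g _).1 hmem
    refine ⟨i, j, rfl, hi, hj, ?_⟩
    simpa [PySem.List.pyGetD_natCast] using hp
  · rintro ⟨i, j, rfl, hi, hj, hc⟩
    exact ⟨(mem_pvCells g _).2 ⟨i, j, rfl, hi, hj⟩, by simpa [PySem.List.pyGetD_natCast] using hc⟩

theorem pvLive_bounds (g : List (List String)) :
    ∀ y ∈ pvLive g, 0 ≤ y.1 ∧ y.1 < pvH g ∧ 0 ≤ y.2 := by
  intro y hy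
  obtain ⟨i, j, rfl, hi, _, _⟩ := (mem_pvLive g y).1 hy
  refine ⟨Int.natCast_nonneg i, ?_, Int.natCast_nonneg j⟩
  simp only [pvH]
  exact_mod_cast hi

-- the cell test the pass guard makes, as membership in the live set
theorem pvGuard_mem (g : List (List String)) (i j : Int) (hi : 0 ≤ i) (hj : 0 ≤ j) :
    (PySem.List.pyGetD (PySem.List.pyGetD g i []) j "" == "@") = true ↔ (i, j) ∈ pvLiveF g := by
  have hi' : i = ((i.toNat : Nat) : Int) := (Int.toNat_of_nonneg hi).symm
  have hj' : j = ((j.toNat : Nat) : Int) := (Int.toNat_of_nonneg hj).symm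
  rw [pvLiveF, List.mem_toFinset, mem_pvLive, hi', hj', PySem.List.pyGetD_natCast,
    PySem.List.pyGetD_natCast]
  constructor
  · intro hbeq
    have hc : (g.getD i.toNat []).getD j.toNat "" = "@" := by simpa using hbeq
    have hilen : i.toNat < g.length := by
      by_contra hle
      rw [List.getD_eq_default g [] (by omega)] at hc
      simp at hc
    have hjlen : j.toNat < (g.getD i.toNat []).length := by
      by_contra hle
      rw [List.getD_eq_default (g.getD i.toNat []) "" (by omega)] at hc
      exact absurd hc (by simp)
    exact ⟨i.toNat, j.toNat, rfl, hilen, hjlen, hc⟩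
  · rintro ⟨i', j', heq, hi1, hj1, hc⟩
    have h1 : i.toNat = i' := by
      have := congrArg Prod.fst heq; simp at this; omega
    have h2 : j.toNat = j' := by
      have := congrArg Prod.snd heq; simp at this; omega
    subst h1; subst h2
    simpa using hc

theorem pvDeg_eq_countP (H W : Int) (S : Finset (Int × Int)) (x : Int × Int) :
    pvDeg H W S x = pvDirections.countP
      (fun d => decide ((x.1 + d.1, x.2 + d.2) ∈ S) && pvInB H W (x.1 + d.1, x.2 + d.2)) := by
  classical
  set q' : (Int × Int) → Bool :=
    fun d => decide ((x.1 + d.1, x.2 + d.2) ∈ S) && pvInB H W (x.1 + d.1, x.2 + d.2) with hq'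
  set f : (Int × Int) → (Int × Int) := fun d => (x.1 + d.1, x.2 + d.2) with hf
  have hinj : Function.Injective f := by
    intro a b hab
    have h1 := congrArg Prod.fst hab
    have h2 := congrArg Prod.snd hab
    simp only [hf] at h1 h2
    exact Prod.ext (by omega) (by omega)
  have hdirs : pvDirections.Nodup := by decide
  have hnodup : ((pvDirections.filter q').map f).Nodup := (hdirs.filter q').map hinj
  have hset : S.filter (fun y => pvAdj H W x y = true) = ((pvDirections.filter q').map f).toFinset := by
    ext y
    simp only [Finset.mem_filter, List.mem_toFinset, List.mem_map, List.mem_filter, hq', hf,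
      pvAdj, Bool.and_eq_true, decide_eq_true_eq]
    constructor
    · rintro ⟨hyS, hadj, hInB⟩
      refine ⟨(y.1 - x.1, y.2 - x.2), ⟨hadj, ?_, ?_⟩, ?_⟩
      · simpa [show x.1 + (y.1 - x.1) = y.1 by ring, show x.2 + (y.2 - x.2) = y.2 by ring,
          ← Prod.ext_iff] using hyS
      · simpa [show x.1 + (y.1 - x.1) = y.1 by ring, show x.2 + (y.2 - x.2) = y.2 by ring,
          ← Prod.ext_iff] using hInB
      · simp [← Prod.ext_iff]
    · rintro ⟨d, ⟨hdmem, hdS, hdInB⟩, rfl⟩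
      refine ⟨hdS, ?_, hdInB⟩
      simpa using hdmem
  rw [pvDeg, hset, List.toFinset_card_of_nodup hnodup, List.length_map,
    ← List.countP_eq_length_filter]

theorem is_roll_accessible_eq (g : List (List String)) (row col : Int) :
    is_roll_accessible g row col = decide (pvDeg (pvH g) (pvW g) (pvLiveF g) (row, col) < 4) := by
  classical
  rw [is_roll_accessible]
  have hbody : (fun (adj : Int) (d : Int × Int) =>
      if 0 ≤ row + d.1 ∧ row + d.1 < PySem.List.len g ∧ 0 ≤ col + d.2 ∧
          col + d.2 < PySem.List.len ((PySem.List.pyGet? g 0).getD []) then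
        (if PySem.List.pyGetD ((PySem.List.pyGet? g (row + d.1)).getD []) (col + d.2) "" == "@"
          then adj + 1 else adj)
      else adj) = (fun (adj : Int) (d : Int × Int) =>
      if (decide ((row + d.1, col + d.2) ∈ pvLiveF g)
          && pvInB (pvH g) (pvW g) (row + d.1, col + d.2)) = true
        then adj + 1 else adj) := by
    funext adj d
    by_cases hb : 0 ≤ row + d.1 ∧ row + d.1 < (g.length : Int) ∧ 0 ≤ col + d.2 ∧
        col + d.2 < pvW g
    · have hInB : pvInB (pvH g) (pvW g) (row + d.1, col + d.2) = true := by
        simp only [pvInB, pvH, Bool.and_eq_true, decide_eq_true_eq]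
        exact ⟨⟨⟨hb.1, hb.2.1⟩, hb.2.2.1⟩, hb.2.2.2⟩
      have hguard : PySem.List.pyGetD ((PySem.List.pyGet? g (row + d.1)).getD []) (col + d.2) "" =
          PySem.List.pyGetD (PySem.List.pyGetD g (row + d.1) []) (col + d.2) "" := rfl
      rw [if_pos (by simpa [PySem.List.len_eq, pvW] using hb)]
      by_cases hc : (PySem.List.pyGetD (PySem.List.pyGetD g (row + d.1) []) (col + d.2) "" == "@") = true
      · have hmem := (pvGuard_mem g (row + d.1) (col + d.2) hb.1 hb.2.2.1).1 hc
        rw [hguard, hc]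
        simp [hmem, hInB]
      · have hmem : ¬ ((row + d.1, col + d.2) ∈ pvLiveF g) := fun hm =>
          hc ((pvGuard_mem g (row + d.1) (col + d.2) hb.1 hb.2.2.1).2 hm)
        rw [hguard, if_neg (by simpa using hc), if_neg (by simp [hmem])]
        
    · have hInB : pvInB (pvH g) (pvW g) (row + d.1, col + d.2) = false := by
        rw [Bool.eq_false_iff]
        intro htrue
        simp only [pvInB, pvH, Bool.and_eq_true, decide_eq_true_eq] at htrue
        exact hb ⟨htrue.1.1.1, htrue.1.1.2, htrue.1.2, htrue.2⟩
      rw [if_neg (by simpa [PySem.List.len_eq, pvW] using hb), if_neg (by simp [hInB])]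
  have hdeg := pvDeg_eq_countP (pvH g) (pvW g) (pvLiveF g) (row, col)
  dsimp only at hdeg
  rw [hbody, PySem.List.foldl_count_if, ← hdeg]
  by_cases hge : (4 : Int) ≤ 0 + (pvDeg (pvH g) (pvW g) (pvLiveF g) (row, col) : Int)
  · rw [if_pos hge]
    have : ¬ (pvDeg (pvH g) (pvW g) (pvLiveF g) (row, col) < 4) := by omega
    simp [this]
  · rw [if_neg hge]
    have : pvDeg (pvH g) (pvW g) (pvLiveF g) (row, col) < 4 := by omega
    simp [this]

theorem pvShape_HW {g g' : List (List String)} (h : pvShape g' = pvShape g) :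
    pvH g' = pvH g ∧ pvW g' = pvW g := by
  have hlen : g'.length = g.length := by
    have := congrArg List.length h
    simpa [pvShape] using this
  refine ⟨by simp [pvH, hlen], ?_⟩
  have h0 : (g'[0]?).map List.length = (g[0]?).map List.length := by
    have := congrArg (fun l => l[0]?) h
    simpa [pvShape] using this
  simp only [pvW, PySem.List.pyGet?_zero]
  cases hg' : g'[0]? with
  | none =>
    cases hg : g[0]? with
    | none => simp
    | some r => rw [hg', hg] at h0; simp at h0
  | some r' =>
    cases hg : g[0]? with
    | none => rw [hg', hg] at h0; simp at h0
    | some r =>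
      rw [hg', hg] at h0
      simp only [Option.map_some, Option.some.injEq] at h0
      simp [h0]

theorem pvLiveF_setX (g : List (List String)) (i j : Nat)
    (hi : i < g.length) (hj : j < (g.getD i []).length) (hc : (g.getD i []).getD j "" = "@") :
    pvLiveF (g.set i ((g.getD i []).set j "X")) = (pvLiveF g).erase ((i : Int), (j : Int)) ∧
      pvShape (g.set i ((g.getD i []).set j "X")) = pvShape g := by
  have hrow : ∀ i' : Nat, (g.set i ((g.getD i []).set j "X")).getD i' [] =
      if i' = i then (g.getD i []).set j "X" else g.getD i' [] := by
    intro i'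
    by_cases hii : i' = i
    · subst hii
      rw [if_pos rfl, List.getD_eq_getElem _ _ (by simpa using hi),
        List.getElem_set_self (by simpa using hi)]
    · rw [if_neg hii]
      by_cases hlt : i' < g.length
      · rw [List.getD_eq_getElem _ _ (by simpa using hlt),
          List.getElem_set_ne (fun h => hii h.symm) (by simpa using hlt),
          List.getD_eq_getElem _ _ hlt]
      · rw [List.getD_eq_default _ _ (by simp; omega), List.getD_eq_default _ _ (by omega)]
  constructor
  · ext x
    simp only [pvLiveF, List.mem_toFinset, mem_pvLive, Finset.mem_erase]
    constructor
    · rintro ⟨i', j', rfl, hi', hj', hc'⟩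
      rw [hrow i'] at hj' hc'
      by_cases hii : i' = i
      · subst hii
        rw [if_pos rfl] at hj' hc'
        simp only [List.length_set] at hj'
        by_cases hjj : j' = j
        · subst hjj
          rw [List.getD_eq_getElem _ _ (by simpa using hj'),
            List.getElem_set_self (by simpa using hj')] at hc'
          exact absurd hc' (by decide)
        · rw [List.getD_eq_getElem _ _ (by simpa using hj'),
            List.getElem_set_ne (fun h => hjj h.symm) (by simpa using hj'),
            ← List.getD_eq_getElem _ _ hj'] at hc'
          refine ⟨by simp [Prod.ext_iff]; omega, i', j', rfl, by simpa using hi', hj', hc'⟩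
      · rw [if_neg hii] at hj' hc'
        refine ⟨by simp [Prod.ext_iff]; omega, i', j', rfl, by simpa using hi', hj', hc'⟩
    · rintro ⟨hne, i', j', rfl, hi', hj', hc'⟩
      refine ⟨i', j', rfl, by simpa using hi', ?_, ?_⟩ <;> rw [hrow i']
      · by_cases hii : i' = i
        · subst hii; rw [if_pos rfl]; simpa [List.length_set] using hj'
        · rwa [if_neg hii]
      · by_cases hii : i' = i
        · subst hii
          rw [if_pos rfl]
          have hjj : j' ≠ j := by
            intro h; subst h; exact hne (by simp)
          rw [List.getD_eq_getElem _ _ (by simpa [List.length_set] using hj'),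
            List.getElem_set_ne (fun h => hjj h.symm) (by simpa using hj'),
            ← List.getD_eq_getElem _ _ hj']
          exact hc'
        · rwa [if_neg hii]
  · have hmap : pvShape (g.set i ((g.getD i []).set j "X")) =
        (pvShape g).set i ((g.getD i []).set j "X").length := by
      simp [pvShape, List.map_set]
    rw [hmap, List.length_set]
    have hgi : (pvShape g)[i]'(by simpa [pvShape] using hi) = (g.getD i []).length := by
      rw [List.getD_eq_getElem _ _ hi]
      simp [pvShape]
    calc (pvShape g).set i (g.getD i []).length
        = (pvShape g).set i ((pvShape g)[i]'(by simpa [pvShape] using hi)) := by rw [hgi]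
      _ = pvShape g := List.set_getElem_self _

-- invariant carried through one pass of the nested loops (part_01 = False)
def pvInv (g0 : List (List String)) (acc0 : Int) (st : List (List String) × Int × Bool) : Prop :=
  pvReach (pvH g0) (pvW g0) (pvLiveF g0) (pvLiveF st.1) ∧ pvShape st.1 = pvShape g0 ∧
    st.2.1 = acc0 + ((pvLiveF g0).card : Int) - ((pvLiveF st.1).card : Int)

theorem pvPassStep_inv (g0 : List (List String)) (acc0 : Int)
    (st : List (List String) × Int × Bool) (ij : Int × Int) (h1 : 0 ≤ ij.1) (h2 : 0 ≤ ij.2)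
    (h : pvInv g0 acc0 st) : pvInv g0 acc0 (pvPassStep false st ij) := by
  obtain ⟨hreach, hshape, hacc⟩ := h
  rw [pvPassStep]
  by_cases hg : (PySem.List.pyGetD (PySem.List.pyGetD st.1 ij.1 []) ij.2 "" == "@"
      && is_roll_accessible st.1 ij.1 ij.2) = true
  · rw [if_pos hg]
    have hgsplit := hg
    rw [Bool.and_eq_true] at hgsplit
    obtain ⟨hcell, hrollacc⟩ := hgsplit
    have hmem : (ij.1, ij.2) ∈ pvLiveF st.1 := (pvGuard_mem st.1 ij.1 ij.2 h1 h2).1 hcell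
    obtain ⟨i', j', hij, hi', hj', hc'⟩ := (mem_pvLive st.1 _).1 (List.mem_toFinset.1 hmem)
    have hij' : ij = ((i' : Int), (j' : Int)) := hij
    subst hij'
    have hdeg : pvDeg (pvH st.1) (pvW st.1) (pvLiveF st.1) ((i' : Int), (j' : Int)) < 4 := by
      rw [is_roll_accessible_eq] at hrollacc
      simpa using hrollacc
    obtain ⟨hH, hW⟩ := pvShape_HW hshape
    have hmem' : ((i' : Int), (j' : Int)) ∈ pvLiveF st.1 := hmem
    have hstep : pvStepR (pvH g0) (pvW g0) (pvLiveF st.1)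
        ((pvLiveF st.1).erase ((i' : Int), (j' : Int))) :=
      ⟨((i' : Int), (j' : Int)), hmem', by rwa [hH, hW] at hdeg, rfl⟩
    have hgrid : PySem.List.pySetD st.1 ((i' : Int), (j' : Int)).1
        (PySem.List.pySetD (PySem.List.pyGetD st.1 ((i' : Int), (j' : Int)).1 [])
          ((i' : Int), (j' : Int)).2 "X") =
        st.1.set i' ((st.1.getD i' []).set j' "X") := by
      simp [PySem.List.pySetD_natCast, PySem.List.pyGetD_natCast]
    obtain ⟨hlive', hshape'⟩ := pvLiveF_setX st.1 i' j' hi' hj' hc'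
    have hcard1 : 1 ≤ (pvLiveF st.1).card := Finset.card_pos.2 ⟨_, hmem'⟩
    have hiffalse : (if false = true then st.1
        else PySem.List.pySetD st.1 ((i' : Int), (j' : Int)).1
          (PySem.List.pySetD (PySem.List.pyGetD st.1 ((i' : Int), (j' : Int)).1 [])
            ((i' : Int), (j' : Int)).2 "X")) =
        st.1.set i' ((st.1.getD i' []).set j' "X") := by
      rw [if_neg (by decide)]
      exact hgrid
    refine ⟨?_, ?_, ?_⟩
    · show pvReach (pvH g0) (pvW g0) (pvLiveF g0) _
      rw [hiffalse, hlive']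
      exact hreach.tail hstep
    · show pvShape _ = pvShape g0
      rw [hiffalse]
      exact hshape'.trans hshape
    · show st.2.1 + 1 = _
      rw [hiffalse, hlive']
      have hce : ((pvLiveF st.1).erase ((i' : Int), (j' : Int))).card =
          (pvLiveF st.1).card - 1 := Finset.card_erase_of_mem hmem'
      rw [hce, hacc]
      push_cast [Nat.cast_sub hcard1]
      ring
  · rw [if_neg hg]
    exact ⟨hreach, hshape, hacc⟩

theorem pvPass_foldl_inv (g0 : List (List String)) (acc0 : Int) (cells : List (Int × Int))
    (hc : ∀ ij ∈ cells, 0 ≤ ij.1 ∧ 0 ≤ ij.2) (st : List (List String) × Int × Bool)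
    (h : pvInv g0 acc0 st) : pvInv g0 acc0 (cells.foldl (pvPassStep false) st) := by
  induction cells generalizing st with
  | nil => exact h
  | cons x cells ih =>
    rw [List.foldl_cons]
    exact ih (fun ij hij => hc ij (List.mem_cons_of_mem _ hij)) _
      (pvPassStep_inv g0 acc0 st x (hc x List.mem_cons_self).1 (hc x List.mem_cons_self).2 h)

theorem pvPassStep_flag_mono (p : Bool) (st : List (List String) × Int × Bool) (ij : Int × Int)
    (h : st.2.2 = true) : (pvPassStep p st ij).2.2 = true := by
  rw [pvPassStep]
  split
  · rfl
  · exact h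

theorem pvPass_foldl_flag_mono (p : Bool) (cells : List (Int × Int))
    (st : List (List String) × Int × Bool) (h : st.2.2 = true) :
    (cells.foldl (pvPassStep p) st).2.2 = true := by
  induction cells generalizing st with
  | nil => exact h
  | cons y cells ih =>
    rw [List.foldl_cons]
    exact ih _ (pvPassStep_flag_mono p st y h)

theorem pvPass_flag_false (p : Bool) (cells : List (Int × Int))
    (st : List (List String) × Int × Bool)
    (h : (cells.foldl (pvPassStep p) st).2.2 = false) :
    cells.foldl (pvPassStep p) st = st ∧ ∀ ij ∈ cells,
      (PySem.List.pyGetD (PySem.List.pyGetD st.1 ij.1 []) ij.2 "" == "@"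
        && is_roll_accessible st.1 ij.1 ij.2) = false := by
  induction cells generalizing st with
  | nil => exact ⟨rfl, by simp⟩
  | cons x cells ih =>
    rw [List.foldl_cons] at h
    by_cases hgx : (PySem.List.pyGetD (PySem.List.pyGetD st.1 x.1 []) x.2 "" == "@"
        && is_roll_accessible st.1 x.1 x.2) = true
    · exfalso
      have : (pvPassStep p st x).2.2 = true := by
        rw [pvPassStep, if_pos hgx]
      rw [pvPass_foldl_flag_mono p cells _ this] at h
      simp at h
    · have hstep : pvPassStep p st x = st := by
        rw [pvPassStep, if_neg hgx]
      rw [hstep] at h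
      obtain ⟨hfix, hall⟩ := ih st h
      refine ⟨by rw [List.foldl_cons, hstep]; exact hfix, ?_⟩
      intro ij hij
      rcases List.mem_cons.1 hij with rfl | hmem
      · exact Bool.eq_false_iff.2 (by simpa using hgx)
      · exact hall ij hmem

theorem pvClosed_of_stuck (g : List (List String)) (acc : Int)
    (h : ((pvCells g).foldl (pvPassStep false) (g, acc, false)).2.2 = false) :
    pvClosed (pvH g) (pvW g) (pvLiveF g) := by
  obtain ⟨-, hall⟩ := pvPass_flag_false false (pvCells g) (g, acc, false) h
  intro x hx
  obtain ⟨i, j, rfl, hi, hj, hc⟩ := (mem_pvLive g x).1 (List.mem_toFinset.1 hx)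
  have hcells : ((i : Int), (j : Int)) ∈ pvCells g := (mem_pvCells g _).2 ⟨i, j, rfl, hi, hj⟩
  have hguard := hall _ hcells
  have hcell : (PySem.List.pyGetD (PySem.List.pyGetD g ((i : Int), (j : Int)).1 [])
      ((i : Int), (j : Int)).2 "" == "@") = true := by
    simp only [PySem.List.pyGetD_natCast]
    simpa using hc
  rw [Bool.and_eq_false_iff] at hguard
  rcases hguard with hguard | hguard
  · rw [hcell] at hguard; exact absurd hguard (by decide)
  · rw [is_roll_accessible_eq] at hguard
    simp only [decide_eq_false_iff_not, not_lt] at hguard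
    simpa using hguard

theorem pvAtCount_setX (g : List (List String)) (i j : Nat)
    (hi : i < g.length) (hj : j < (g.getD i []).length) (hc : (g.getD i []).getD j "" = "@") :
    pvAtCount (g.set i ((g.getD i []).set j "X")) < pvAtCount g := by
  have hrow : g.getD i [] = g[i] := List.getD_eq_getElem _ _ hi
  have hj' : j < g[i].length := by rwa [hrow] at hj
  have hcell : g[i][j] = "@" := by
    rw [hrow] at hc
    rwa [List.getD_eq_getElem _ _ hj'] at hc
  have hcount : (g[i].set j "X").count "@" < g[i].count "@" := by
    rw [List.count_set hj']
    simp [hcell]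
    exact hcell ▸ List.getElem_mem hj' 
  have hmap : (g.set i ((g.getD i []).set j "X")).map (fun row => row.count "@") =
      ((g.map (fun row => row.count "@")).set i ((g[i].set j "X").count "@")) := by
    rw [List.map_set, hrow]
  have hself : g.map (fun row => row.count "@") =
      ((g.map (fun row => row.count "@")).set i (g[i].count "@")) := by
    have : (g.map (fun row => row.count "@"))[i]'(by simpa using hi) = g[i].count "@" := by
      simp
    conv_lhs => rw [← List.set_getElem_self
      (show i < (g.map (fun row => row.count "@")).length by simpa using hi)]
    rw [this]
  rw [pvAtCount, pvAtCount, hmap]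
  conv_rhs => rw [hself]
  rw [List.sum_set, List.sum_set]
  have hilen : i < (g.map (fun row => row.count "@")).length := by simpa using hi
  rw [if_pos hilen, if_pos hilen]
  omega

-- "@"-count strictly decreases over a firing pass (fuel sufficiency for port A)
theorem pvPassStep_shrinks (st : List (List String) × Int × Bool) (ij : Int × Int)
    (h1 : 0 ≤ ij.1) (h2 : 0 ≤ ij.2) :
    pvPassStep false st ij = st ∨
      (pvAtCount (pvPassStep false st ij).1 < pvAtCount st.1 ∧ (pvPassStep false st ij).2.2 = true) := by
  rw [pvPassStep]
  by_cases hg : (PySem.List.pyGetD (PySem.List.pyGetD st.1 ij.1 []) ij.2 "" == "@"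
      && is_roll_accessible st.1 ij.1 ij.2) = true
  · right
    rw [if_pos hg]
    have hgsplit := hg
    rw [Bool.and_eq_true] at hgsplit
    obtain ⟨hcell, -⟩ := hgsplit
    have hmem : (ij.1, ij.2) ∈ pvLiveF st.1 := (pvGuard_mem st.1 ij.1 ij.2 h1 h2).1 hcell
    obtain ⟨i', j', hij, hi', hj', hc'⟩ := (mem_pvLive st.1 _).1 (List.mem_toFinset.1 hmem)
    have hij' : ij = ((i' : Int), (j' : Int)) := hij
    subst hij'
    have hiffalse : (if false = true then st.1
        else PySem.List.pySetD st.1 (((i' : Int), (j' : Int)) : Int × Int).1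
          (PySem.List.pySetD (PySem.List.pyGetD st.1 (((i' : Int), (j' : Int)) : Int × Int).1 [])
            (((i' : Int), (j' : Int)) : Int × Int).2 "X")) =
        st.1.set i' ((st.1.getD i' []).set j' "X") := by
      rw [if_neg (by decide)]
      simp [PySem.List.pySetD_natCast, PySem.List.pyGetD_natCast]
    constructor
    · show pvAtCount _ < _
      rw [hiffalse]
      exact pvAtCount_setX st.1 i' j' hi' hj' hc'
    · rfl
  · left
    rw [if_neg hg]

theorem pvPass_foldl_le (cells : List (Int × Int)) (hc : ∀ ij ∈ cells, 0 ≤ ij.1 ∧ 0 ≤ ij.2)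
    (st : List (List String) × Int × Bool) :
    pvAtCount (cells.foldl (pvPassStep false) st).1 ≤ pvAtCount st.1 ∧
      ((cells.foldl (pvPassStep false) st).2.2 = true →
        st.2.2 = true ∨ pvAtCount (cells.foldl (pvPassStep false) st).1 < pvAtCount st.1) := by
  induction cells generalizing st with
  | nil => exact ⟨le_refl _, fun h => Or.inl h⟩
  | cons x cells ih =>
    rw [List.foldl_cons]
    have hx := hc x List.mem_cons_self
    have ihx := ih (fun ij hij => hc ij (List.mem_cons_of_mem _ hij)) (pvPassStep false st x)
    rcases pvPassStep_shrinks st x hx.1 hx.2 with heq | ⟨hlt, hflag⟩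
    · rw [heq]
      exact ih (fun ij hij => hc ij (List.mem_cons_of_mem _ hij)) st
    · refine ⟨le_trans ihx.1 (le_of_lt hlt), fun _ => Or.inr (lt_of_le_of_lt ihx.1 hlt)⟩

theorem pvPass_decreases (grid : List (List String)) (acc : Int)
    (h : ((pvCells grid).foldl (pvPassStep false) (grid, acc, false)).2.2 = true) :
    pvAtCount ((pvCells grid).foldl (pvPassStep false) (grid, acc, false)).1 < pvAtCount grid := by
  rcases (pvPass_foldl_le (pvCells grid) (pvCells_nonneg grid) (grid, acc, false)).2 h with h' | h'
  · simp at h'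
  · exact h'

-- what port A computes when part_01 = False: a maximal peeling run
theorem pvRecGo_spec (fuel : Nat) : ∀ (g : List (List String)) (acc : Int),
    pvAtCount g < fuel → ∃ S : Finset (Int × Int),
      pvReach (pvH g) (pvW g) (pvLiveF g) S ∧ pvClosed (pvH g) (pvW g) S ∧
        pvRecGo fuel g acc false = acc + ((pvLiveF g).card : Int) - (S.card : Int) := by
  induction fuel with
  | zero => intro g acc h; exact absurd h (Nat.not_lt_zero _)
  | succ n ih =>
    intro g acc h
    have hinv0 : pvInv g acc (g, acc, false) := ⟨Relation.ReflTransGen.refl, rfl, by ring⟩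
    by_cases hflag : ((pvCells g).foldl (pvPassStep false) (g, acc, false)).2.2 = true
    · have hinv := pvPass_foldl_inv g acc (pvCells g) (pvCells_nonneg g) _ hinv0
      obtain ⟨hreach, hshape, hacc⟩ := hinv
      have hless := pvPass_decreases g acc hflag
      obtain ⟨S, hS1, hS2, hS3⟩ :=
        ih ((pvCells g).foldl (pvPassStep false) (g, acc, false)).1
          ((pvCells g).foldl (pvPassStep false) (g, acc, false)).2.1 (by omega)
      obtain ⟨hH, hW⟩ := pvShape_HW hshape
      refine ⟨S, hreach.trans (by rwa [hH, hW] at hS1), by rwa [hH, hW] at hS2, ?_⟩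
      have hstep : pvRecGo (n + 1) g acc false =
          pvRecGo n ((pvCells g).foldl (pvPassStep false) (g, acc, false)).1
            ((pvCells g).foldl (pvPassStep false) (g, acc, false)).2.1 false := by
        simp only [pvRecGo]
        rw [if_neg (by decide), if_pos hflag]
      rw [hstep, hS3, hacc]
      push_cast
      ring
    · obtain ⟨hfix, -⟩ := pvPass_flag_false false (pvCells g) (g, acc, false)
        (by simpa using hflag)
      refine ⟨pvLiveF g, Relation.ReflTransGen.refl,
        pvClosed_of_stuck g acc (by simpa using hflag), ?_⟩
      have hval : pvRecGo (n + 1) g acc false = acc := by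
        simp only [pvRecGo]
        rw [if_neg (by decide), if_neg (by simpa using hflag), hfix]
      rw [hval]
      ring

-- what port A computes when part_01 = True
theorem pvPass_true_foldl (g : List (List String)) (cells : List (Int × Int)) :
    ∀ (acc : Int) (f : Bool), cells.foldl (pvPassStep true) (g, acc, f) =
      (g, acc + (cells.countP (fun ij =>
        PySem.List.pyGetD (PySem.List.pyGetD g ij.1 []) ij.2 "" == "@"
          && is_roll_accessible g ij.1 ij.2) : Int),
       f || cells.any (fun ij =>
        PySem.List.pyGetD (PySem.List.pyGetD g ij.1 []) ij.2 "" == "@"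
          && is_roll_accessible g ij.1 ij.2)) := by
  induction cells with
  | nil => intro acc f; simp
  | cons x cells ih =>
    intro acc f
    rw [List.foldl_cons]
    by_cases hgx : (PySem.List.pyGetD (PySem.List.pyGetD g x.1 []) x.2 "" == "@"
        && is_roll_accessible g x.1 x.2) = true
    · have hstepeq : pvPassStep true (g, acc, f) x = (g, acc + 1, true) := by
        rw [pvPassStep, if_pos hgx, if_pos rfl]
      rw [hstepeq, ih (acc + 1) true]
      simp only [List.countP_cons, List.any_cons, hgx, Prod.mk.injEq]
      refine ⟨trivial, by push_cast; ring, by simp⟩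
    · have hstepeq : pvPassStep true (g, acc, f) x = (g, acc, f) := by
        rw [pvPassStep, if_neg hgx]
      rw [hstepeq, ih acc f]
      simp only [List.countP_cons, List.any_cons, Prod.mk.injEq]
      have hgx' : (PySem.List.pyGetD (PySem.List.pyGetD g x.1 []) x.2 "" == "@"
          && is_roll_accessible g x.1 x.2) = false := Bool.eq_false_iff.2 hgx
      refine ⟨trivial, by simp [hgx'], by simp [hgx']⟩

-- ---- B-side bookkeeping ----

theorem pvDirections_neg (a b : Int) : (a, b) ∈ pvDirections ↔ (-a, -b) ∈ pvDirections := by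
  simp only [pvDirections, List.mem_cons, Prod.ext_iff, List.not_mem_nil, or_false]
  omega

theorem pvCounts_getD (H W : Int) (cells : List (Int × Int))
    (hb : ∀ y ∈ cells, 0 ≤ y.1 ∧ y.1 < H ∧ 0 ≤ y.2) (x : Int × Int) :
    (pvNeighbourCounts W cells).getD x 0 = (cells.countP (fun y => pvAdj H W x y) : Int) := by
  have hgen : ∀ (cells : List (Int × Int)), (∀ y ∈ cells, 0 ≤ y.1 ∧ y.1 < H ∧ 0 ≤ y.2) →
      ∀ (d : PySem.Dict (Int × Int) Int),
      (cells.foldl (fun counts rc =>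
        if rc.2 < W then
          pvDirections.foldl (fun cts dd =>
            cts.insert (rc.1 + dd.1, rc.2 + dd.2) (cts.getD (rc.1 + dd.1, rc.2 + dd.2) 0 + 1)) counts
        else counts) d).getD x 0 =
      d.getD x 0 + (cells.countP (fun y => pvAdj H W x y) : Int) := by
    intro cells hb
    induction cells with
    | nil => intro d; simp
    | cons y cells ih =>
      intro d
      rw [List.foldl_cons, List.countP_cons,
        ih (fun z hz => hb z (List.mem_cons_of_mem _ hz))]
      have hy := hb y List.mem_cons_self
      by_cases hw : y.2 < W
      · rw [if_pos hw]
        have hinner : (pvDirections.foldl (fun cts dd =>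
            cts.insert (y.1 + dd.1, y.2 + dd.2) (cts.getD (y.1 + dd.1, y.2 + dd.2) 0 + 1)) d) =
            ((pvDirections.map (fun dd => (y.1 + dd.1, y.2 + dd.2))).foldl
              (fun cts k => cts.insert k (cts.getD k 0 + 1)) d) := by
          rw [List.foldl_map]
        rw [hinner, PySem.Dict.getD_foldl_insert_add_one]
        have hxform : x = (fun dd : Int × Int => (y.1 + dd.1, y.2 + dd.2))
            ((x.1 - y.1, x.2 - y.2)) := by
          simp [Prod.ext_iff]
        have hcnt : (pvDirections.map (fun dd => (y.1 + dd.1, y.2 + dd.2))).count x =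
            pvDirections.count ((x.1 - y.1, x.2 - y.2)) := by
          have hinj : Function.Injective (fun dd : Int × Int => (y.1 + dd.1, y.2 + dd.2)) := by
            intro a b hab
            have h1 := congrArg Prod.fst hab
            have h2 := congrArg Prod.snd hab
            simp only at h1 h2
            exact Prod.ext (by omega) (by omega)
          conv_lhs => rw [hxform]
          exact List.count_map_of_injective _ _ hinj _
        rw [hcnt]
        have hadj : pvAdj H W x y = decide ((x.1 - y.1, x.2 - y.2) ∈ pvDirections) := by
          have hmemiff : ((y.1 - x.1, y.2 - x.2) ∈ pvDirections) ↔
              ((x.1 - y.1, x.2 - y.2) ∈ pvDirections) := by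
            constructor
            · intro hmm
              have := (pvDirections_neg (y.1 - x.1) (y.2 - x.2)).1 hmm
              simpa [show -(y.1 - x.1) = x.1 - y.1 by ring,
                show -(y.2 - x.2) = x.2 - y.2 by ring] using this
            · intro hmm
              have := (pvDirections_neg (x.1 - y.1) (x.2 - y.2)).1 hmm
              simpa [show -(x.1 - y.1) = y.1 - x.1 by ring,
                show -(x.2 - y.2) = y.2 - x.2 by ring] using this
          have hInB : pvInB H W y = true := by
            simp only [pvInB, Bool.and_eq_true, decide_eq_true_eq]
            exact ⟨⟨⟨hy.1, hy.2.1⟩, hy.2.2⟩, hw⟩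
          rw [pvAdj, hInB, Bool.and_true]
          simp [hmemiff]
        rw [hadj]
        by_cases hmem : ((x.1 - y.1, x.2 - y.2) ∈ pvDirections)
        · rw [List.count_eq_one_of_mem (by decide) hmem]
          simp [hmem]
          push_cast
          ring
        · rw [List.count_eq_zero_of_not_mem hmem]
          simp [hmem]
      · rw [if_neg hw]
        have hadj : pvAdj H W x y = false := by
          rw [Bool.eq_false_iff]
          intro htrue
          simp only [pvAdj, pvInB, Bool.and_eq_true, decide_eq_true_eq] at htrue
          exact hw htrue.2.2
        simp [hadj]
  rw [pvNeighbourCounts, hgen cells hb PySem.Dict.empty]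
  simp

theorem pvCountP_eq_deg (H W : Int) (live : List (Int × Int)) (hnd : live.Nodup) (x : Int × Int) :
    live.countP (fun y => pvAdj H W x y) = pvDeg H W live.toFinset x := by
  rw [pvDeg, ← List.toFinset_filter, List.toFinset_card_of_nodup (hnd.filter _),
    List.countP_eq_length_filter]

-- what port B's loop computes: another maximal peeling run
theorem pvPeel_spec (H : Int) (fuel : Nat) : ∀ (live : List (Int × Int)) (removed : Int) (W : Int),
    live.Nodup → (∀ y ∈ live, 0 ≤ y.1 ∧ y.1 < H ∧ 0 ≤ y.2) → live.length < fuel →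
    ∃ S : Finset (Int × Int), pvReach H W live.toFinset S ∧ pvClosed H W S ∧
      pvPeel W fuel removed live = removed + (live.length : Int) - (S.card : Int) := by
  induction fuel with
  | zero => intro live removed W hnd hb h; exact absurd h (Nat.not_lt_zero _)
  | succ n ih =>
    intro live removed W hnd hb h
    have hofl : PySem.Set.ofList (live.filter
        (fun cell => decide ((pvNeighbourCounts W live).getD cell 0 < 4))) =
        live.filter (fun cell => decide ((pvNeighbourCounts W live).getD cell 0 < 4)) :=
      pvOfList_eq_self _ (hnd.filter _)
    have hpdeg : ∀ cell, (decide ((pvNeighbourCounts W live).getD cell 0 < 4)) =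
        decide (pvDeg H W live.toFinset cell < 4) := by
      intro cell
      rw [pvCounts_getD H W live hb, decide_eq_decide]
      rw [← pvCountP_eq_deg H W live hnd]
      omega
    by_cases hempty : (live.filter
        (fun cell => decide ((pvNeighbourCounts W live).getD cell 0 < 4))).isEmpty
    · have hclosed : pvClosed H W live.toFinset := by
        intro z hz
        have hzl : z ∈ live := List.mem_toFinset.1 hz
        have hnil : live.filter
            (fun cell => decide ((pvNeighbourCounts W live).getD cell 0 < 4)) = [] :=
          List.isEmpty_iff.1 hempty
        have hpz := List.filter_eq_nil_iff.1 hnil z hzl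
        rw [hpdeg z] at hpz
        simp only [decide_eq_true_eq] at hpz
        omega
      refine ⟨live.toFinset, Relation.ReflTransGen.refl, hclosed, ?_⟩
      have hval : pvPeel W (n + 1) removed live = removed := by
        simp only [pvPeel]
        rw [hofl, if_pos hempty]
      rw [hval, List.toFinset_card_of_nodup hnd]
      ring
    · set p : Int × Int → Bool :=
        fun cell => decide ((pvNeighbourCounts W live).getD cell 0 < 4) with hp
      set R : Finset (Int × Int) := (live.filter p).toFinset with hR
      have hRsub : R ⊆ live.toFinset := by
        intro z hz
        rw [hR, List.mem_toFinset, List.mem_filter] at hz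
        exact List.mem_toFinset.2 hz.1
      have hRdeg : ∀ z ∈ R, pvDeg H W live.toFinset z < 4 := by
        intro z hz
        rw [hR, List.mem_toFinset, List.mem_filter] at hz
        have := hz.2
        rw [hp] at this
        simp only at this
        rw [hpdeg z] at this
        simpa using this
      have hreach1 : pvReach H W live.toFinset (live.toFinset \ R) :=
        pvSeq_remove H W R live.toFinset hRsub hRdeg
      have hdiff : PySem.Set.diff live (PySem.Set.ofList (live.filter p)) =
          live.filter (fun z => !p z) := by
        rw [hofl, PySem.Set.diff]
        refine List.filter_congr ?_
        intro z hzl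
        by_cases hpz : p z = true
        · simp [List.contains_eq_mem, List.mem_filter, hzl, hpz]
        · simp [List.contains_eq_mem, List.mem_filter, Bool.eq_false_iff.2 hpz]
      have hnewnd : (live.filter (fun z => !p z)).Nodup := hnd.filter _
      have hnewb : ∀ y ∈ live.filter (fun z => !p z), 0 ≤ y.1 ∧ y.1 < H ∧ 0 ≤ y.2 :=
        fun y hy => hb y (List.mem_filter.1 hy).1
      have hlensplit : (live.filter p).length + (live.filter (fun z => !p z)).length =
          live.length := List.length_eq_length_filter_add p ▸ rfl
      have hRpos : 0 < (live.filter p).length := by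
        rw [List.length_pos_iff]
        intro hnil
        rw [hp] at hnil
        rw [hnil] at hempty
        simp at hempty
      have hnewlen : (live.filter (fun z => !p z)).length < n := by omega
      obtain ⟨S, hS1, hS2, hS3⟩ := ih (live.filter (fun z => !p z))
        (removed + PySem.Set.len (PySem.Set.ofList (live.filter p))) W hnewnd hnewb hnewlen
      have htofin : (live.filter (fun z => !p z)).toFinset = live.toFinset \ R := by
        ext z
        simp only [List.mem_toFinset, List.mem_filter, Finset.mem_sdiff, hR]
        by_cases hpz : p z = true <;> simp [hpz]
      have hval : pvPeel W (n + 1) removed live =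
          pvPeel W n (removed + PySem.Set.len (PySem.Set.ofList (live.filter p)))
            (PySem.Set.diff live (PySem.Set.ofList (live.filter p))) := by
        simp only [pvPeel]
        rw [if_neg (by rw [hofl]; exact hempty)]
      refine ⟨S, ?_, hS2, ?_⟩
      · refine hreach1.trans ?_
        rwa [htofin] at hS1
      · rw [hval, hdiff, hS3]
        have hlenR : PySem.Set.len (PySem.Set.ofList (live.filter p)) =
            ((live.filter p).length : Int) := by
          rw [hofl, PySem.Set.len]
        rw [hlenR]
        push_cast
        omega

-- ---- assembly ----

theorem pvMain (grid : List (List String)) (accessible_rolls : Int) (part_01 : Bool) :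
    rec_compute_accessible_rolls grid accessible_rolls part_01 =
      rec_compute_accessible_rolls_alt grid accessible_rolls part_01 := by
  have hwidth : PySem.List.len ((PySem.List.pyGet? grid 0).getD ([] : List String)) = pvW grid := by
    simp [PySem.List.len_eq, pvW]
  cases part_01 with
  | false =>
    obtain ⟨SA, hA1, hA2, hA3⟩ :=
      pvRecGo_spec (pvAtCount grid + 1) grid accessible_rolls (by omega)
    obtain ⟨SB, hB1, hB2, hB3⟩ :=
      pvPeel_spec (pvH grid) ((pvLive grid).length + 1) (pvLive grid) 0 (pvW grid)
        (pvLive_nodup grid) (pvLive_bounds grid) (by omega)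
    have hAB : SA = SB := by
      refine pvFinal_unique (pvH grid) (pvW grid) ?_ hA2 hB1 hB2
      rwa [pvLiveF] at hA1
    have hcard : ((pvLiveF grid).card : Int) = ((pvLive grid).length : Int) := by
      rw [pvLiveF, List.toFinset_card_of_nodup (pvLive_nodup grid)]
    show pvRecGo (pvAtCount grid + 1) grid accessible_rolls false =
      accessible_rolls + pvPeel (PySem.List.len ((PySem.List.pyGet? grid 0).getD []))
        ((pvLive grid).length + 1) 0 (pvLive grid)
    rw [hA3, hwidth, hB3, hAB, hcard]
    ring
  | true =>
    have hA : rec_compute_accessible_rolls grid accessible_rolls true =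
        ((pvCells grid).foldl (pvPassStep true) (grid, accessible_rolls, false)).2.1 := rfl
    rw [hA, pvPass_true_foldl grid (pvCells grid) accessible_rolls false]
    show _ = accessible_rolls +
      (((pvLive grid).filter (fun cell => decide ((pvNeighbourCounts
        (PySem.List.len ((PySem.List.pyGet? grid 0).getD [])) (pvLive grid)).getD cell 0 < 4))).length : Int)
    have hcount : (pvCells grid).countP (fun ij =>
        PySem.List.pyGetD (PySem.List.pyGetD grid ij.1 []) ij.2 "" == "@"
          && is_roll_accessible grid ij.1 ij.2) =
        ((pvLive grid).filter (fun cell => decide ((pvNeighbourCounts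
          (PySem.List.len ((PySem.List.pyGet? grid 0).getD [])) (pvLive grid)).getD cell 0 < 4))).length := by
      have h1 : (pvCells grid).countP (fun ij =>
          PySem.List.pyGetD (PySem.List.pyGetD grid ij.1 []) ij.2 "" == "@"
            && is_roll_accessible grid ij.1 ij.2) =
          (pvCells grid).countP (fun ij =>
            is_roll_accessible grid ij.1 ij.2
              && (PySem.List.pyGetD (PySem.List.pyGetD grid ij.1 []) ij.2 "" == "@")) := by
        refine List.countP_congr ?_
        intro ij _
        rw [Bool.and_comm]
      rw [h1, ← List.countP_filter, ← pvLive_eq_filter, ← List.countP_eq_length_filter]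
      refine List.countP_congr ?_
      intro cell hcell
      rw [is_roll_accessible_eq, hwidth,
        pvCounts_getD (pvH grid) (pvW grid) (pvLive grid) (pvLive_bounds grid),
        pvCountP_eq_deg (pvH grid) (pvW grid) (pvLive grid) (pvLive_nodup grid)]
      simp only [decide_eq_true_eq, Prod.mk.eta]
      have hlf : pvLiveF grid = (pvLive grid).toFinset := rfl
      rw [← hlf]
      omega
    rw [hcount]
  


-- ===== VERDICT (by name: the statement is the Claim_ definition above) =====
theorem rec_compute_accessible_rolls_spec : Claim_equal_rec_compute_accessible_rolls := by
  intro grid acc p01 _ _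
  unfold Spec_rec_compute_accessible_rolls
  exact pvMain grid acc p01
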